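-- pv_equiv track=rewrite | github.com/pica2108/TFG_GenProc | Algortimos/Versiones Finales/Perlin/islasYCostas.py | obtenerBordes
-- ===== SOURCE A (Python) =====
-- def obtenerBordes(width, height):
--     bordes = []
--
--     margen_y_superior = round(height * 0.09)
--     margen_y_inferior = round(height * 0.05)
--     margen_x_izquierda = round(width * 0.08)
--     margen_x_derecha = round(width * 0.04)
--
--     for y in range(height):
--         for x in range(width):
--             if y < margen_y_superior or y >= height - margen_y_inferior or x < margen_x_izquierda or x >= width - margen_x_derecha:
--                 bordes.append((y, x))
--
--     return bordes
-- ===== SOURCE B (Python) =====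
-- def obtenerBordes(width, height):
--     # Same margins as the original; emit full border rows and interior side
--     # strips directly instead of testing every cell of the grid.
--     top = round(height * 0.09)
--     bottom = round(height * 0.05)
--     left = round(width * 0.08)
--     right = round(width * 0.04)
--
--     bordes = []
--     for y in range(height):
--         if y < top or y >= height - bottom:
--             bordes.extend((y, x) for x in range(width))
--         else:
--             bordes.extend((y, x) for x in range(left))
--             bordes.extend((y, x) for x in range(max(width - right, left), width))
--     return bordes
-- ===== Notes on version B (the rewrite author's own statement) =====
-- stated objective: faster
-- what changed: Instead of scanning every cell of the height x width grid and testing the border condition per cell, B emits full top/bottom rows and the left/right strips of interior rows directly (right strip starting at max(width-right,left) to handle overlap), producing the same row-major list.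
import Mathlib
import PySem

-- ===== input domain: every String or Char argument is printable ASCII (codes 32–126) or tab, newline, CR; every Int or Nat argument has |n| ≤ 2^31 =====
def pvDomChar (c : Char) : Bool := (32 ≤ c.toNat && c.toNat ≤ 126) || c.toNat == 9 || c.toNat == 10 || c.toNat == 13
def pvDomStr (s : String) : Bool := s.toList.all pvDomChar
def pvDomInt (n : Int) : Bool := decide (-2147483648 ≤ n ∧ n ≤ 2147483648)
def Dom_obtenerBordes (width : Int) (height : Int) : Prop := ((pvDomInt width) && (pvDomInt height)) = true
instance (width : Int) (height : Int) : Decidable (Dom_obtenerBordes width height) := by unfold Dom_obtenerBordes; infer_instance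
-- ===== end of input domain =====

-- B replaces A's per-cell border test over the whole grid by direct emission of
-- full top/bottom rows and interior left/right strips, in the same row-major order.

-- Shared helper: exact emulation of Python's round(float(n) * c) for a positive double
-- constant c = M * 2^(-S) (M the 53-bit significand), exact for |n| ≤ 2^31:
-- the product n*M*2^(-S) is first rounded to 53 significant bits (IEEE-754 round half to
-- even = float multiplication), then rounded half-to-even to an integer (Python round).

-- round-half-to-even of a / 2^s
def pvRHE (a s : Nat) : Nat :=
  if s = 0 then a else
    let q := a / 2 ^ s
    let r := a % 2 ^ s
    let half := 2 ^ (s - 1)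
    if half < r ∨ (r = half ∧ q % 2 = 1) then q + 1 else q

def pvRoundPos (n M S : Nat) : Nat :=
  let p := n * M
  if p = 0 then 0 else
    let s1 := (Nat.log2 p + 1) - 53   -- excess bits beyond the 53-bit significand
    pvRHE (pvRHE p s1) (S - s1)

-- round(float(n) * (M * 2^(-S))) for any sign of n (floats round symmetrically)
def pyRoundMul (n : Int) (M S : Nat) : Int :=
  if n < 0 then -(pvRoundPos n.natAbs M S : Int) else (pvRoundPos n.natAbs M S : Int)

-- ===== PORT A =====
def obtenerBordes (width : Int) (height : Int) : List (Int × Int) :=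
  let margen_y_superior := pyRoundMul height 6485183463413514 56   -- round(height*0.09)
  let margen_y_inferior := pyRoundMul height 7205759403792794 57   -- round(height*0.05)
  let margen_x_izquierda := pyRoundMul width 5764607523034235 56   -- round(width*0.08)
  let margen_x_derecha := pyRoundMul width 5764607523034235 57     -- round(width*0.04)
  (PySem.List.pyRange 0 height 1).foldl (fun bordes y =>
    (PySem.List.pyRange 0 width 1).foldl (fun bordes x =>
      if y < margen_y_superior ∨ height - margen_y_inferior ≤ y ∨
         x < margen_x_izquierda ∨ width - margen_x_derecha ≤ x then
        bordes ++ [(y, x)]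
      else bordes) bordes) []

-- ===== PORT B =====
def obtenerBordes_alt (width : Int) (height : Int) : List (Int × Int) :=
  let top := pyRoundMul height 6485183463413514 56
  let bottom := pyRoundMul height 7205759403792794 57
  let left := pyRoundMul width 5764607523034235 56
  let right := pyRoundMul width 5764607523034235 57
  (PySem.List.pyRange 0 height 1).foldl (fun bordes y =>
    if y < top ∨ height - bottom ≤ y then
      bordes ++ (PySem.List.pyRange 0 width 1).map (fun x => (y, x))
    else
      bordes ++ (PySem.List.pyRange 0 left 1).map (fun x => (y, x))
        ++ (PySem.List.pyRange (max (width - right) left) width 1).map (fun x => (y, x))) []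

-- ===== PRECONDITION & SPEC =====
def Spec_obtenerBordes (width : Int) (height : Int) (out : List (Int × Int)) : Prop := out = obtenerBordes_alt width height
instance (width : Int) (height : Int) (out : List (Int × Int)) : Decidable (Spec_obtenerBordes width height out) := by unfold Spec_obtenerBordes; infer_instance

-- ===== CLAIM (what is proved, stated in full; the proofs are below) =====
def Claim_equal_obtenerBordes : Prop := ∀ (width : Int) (height : Int), Dom_obtenerBordes width height → Spec_obtenerBordes width height (obtenerBordes width height)

-- ===== LEMMAS AND PROOFS =====

-- 'if p(x): out.append(f(x))' loop shape, Prop test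
theorem pv_foldl_append_ite_map {α β : Type} (p : α → Prop) [DecidablePred p] (f : α → β)
    (l : List α) (acc : List β) :
    l.foldl (fun acc x => if p x then acc ++ [f x] else acc) acc
      = acc ++ (l.filter (fun x => decide (p x))).map f := by
  induction l generalizing acc with
  | nil => simp
  | cons a t ih =>
    by_cases h : p a <;> simp [h, ih, List.append_assoc]

-- sign facts about pyRoundMul
theorem pyRoundMul_nonneg (n : Int) (M S : Nat) (h : 0 ≤ n) : 0 ≤ pyRoundMul n M S := by
  simp only [pyRoundMul]
  rw [if_neg (by omega)]
  exact Int.natCast_nonneg _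

theorem pyRoundMul_nonpos (n : Int) (M S : Nat) (h : n ≤ 0) : pyRoundMul n M S ≤ 0 := by
  simp only [pyRoundMul]
  by_cases hn : n < 0
  · rw [if_pos hn]; omega
  · have hz : n = 0 := by omega
    subst hz
    simp [pvRoundPos]

-- the rounding step never overshoots by more than half an ulp
theorem pvRHE_le (a s : Nat) (hs : 1 ≤ s) : pvRHE a s * 2 ^ s ≤ a + 2 ^ (s - 1) := by
  obtain ⟨t, rfl⟩ : ∃ t, s = t + 1 := ⟨s - 1, by omega⟩
  simp only [pvRHE, if_neg (by omega : ¬ (t + 1 = 0)), Nat.add_sub_cancel]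
  have hd : 2 ^ (t + 1) * (a / 2 ^ (t + 1)) + a % 2 ^ (t + 1) = a := Nat.div_add_mod a _
  have hm : a % 2 ^ (t + 1) < 2 ^ (t + 1) := Nat.mod_lt _ (by positivity)
  have hp : (2 : Nat) ^ (t + 1) = 2 * 2 ^ t := by ring
  split
  · have g1 : (a / 2 ^ (t + 1) + 1) * 2 ^ (t + 1)
        = 2 ^ (t + 1) * (a / 2 ^ (t + 1)) + 2 ^ (t + 1) := by ring
    rw [g1]; omega
  · have g1 : (a / 2 ^ (t + 1)) * 2 ^ (t + 1) = 2 ^ (t + 1) * (a / 2 ^ (t + 1)) := by ring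
    rw [g1]; omega

-- pvRoundPos n M 56 ≤ n for a significand 2^55 ≤ M < 2^53·… and 0 < n ≤ 2^31
theorem pvRoundPos_le (n M : Nat) (hM0 : 0 < M) (hM : M < 9007199254740992)
    (hn1 : 1 ≤ n) (hn2 : n ≤ 2147483648) : pvRoundPos n M 56 ≤ n := by
  simp only [pvRoundPos]
  have hp0 : n * M ≠ 0 := by positivity
  rw [if_neg hp0]
  set p := n * M with hp
  set s1 := (Nat.log2 p + 1) - 53 with hs1
  have hnm : n * M ≤ n * 9007199254740992 := Nat.mul_le_mul (le_refl n) (le_of_lt hM)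
  -- p < 2^84, so at most 31 excess bits
  have hplt : p < 2 ^ 84 := by
    have h1 : p ≤ 2147483648 * 9007199254740991 := by
      rw [hp]; exact Nat.mul_le_mul hn2 (by omega)
    calc p ≤ 2147483648 * 9007199254740991 := h1
      _ < 2 ^ 84 := by norm_num
  have hlog : Nat.log2 p < 84 := (Nat.log2_lt hp0).mpr hplt
  have hs1le : s1 ≤ 31 := by omega
  by_cases hz : s1 = 0
  · rw [hz]
    have he : pvRHE p 0 = p := by simp [pvRHE]
    have e0 : (56 : Nat) - 0 = 56 := rfl
    rw [e0, he]
    have h := pvRHE_le p 56 (by omega)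
    omega
  · have hs1ge : 1 ≤ s1 := by omega
    set p1 := pvRHE p s1 with hp1
    have h1 : p1 * 2 ^ s1 ≤ p + 2 ^ (s1 - 1) := pvRHE_le p s1 hs1ge
    set s2 := 56 - s1 with hs2
    have hs2ge : 1 ≤ s2 := by omega
    set res := pvRHE p1 s2 with hres
    have h2 : res * 2 ^ s2 ≤ p1 + 2 ^ (s2 - 1) := pvRHE_le p1 s2 hs2ge
    have e1 : 2 ^ s2 * 2 ^ s1 = 2 ^ 56 := by
      rw [← pow_add]; congr 1; omega
    have e2 : 2 ^ (s2 - 1) * 2 ^ s1 = 2 ^ 55 := by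
      rw [← pow_add]; congr 1; omega
    have e3 : (2 : Nat) ^ (s1 - 1) ≤ 2 ^ 31 := Nat.pow_le_pow_right (by norm_num) (by omega)
    have h3 : res * 2 ^ 56 ≤ p + 2 ^ (s1 - 1) + 2 ^ 55 := by
      calc res * 2 ^ 56 = res * 2 ^ s2 * 2 ^ s1 := by rw [mul_assoc, e1]
        _ ≤ (p1 + 2 ^ (s2 - 1)) * 2 ^ s1 := Nat.mul_le_mul h2 (le_refl _)
        _ = p1 * 2 ^ s1 + 2 ^ (s2 - 1) * 2 ^ s1 := by ring
        _ = p1 * 2 ^ s1 + 2 ^ 55 := by rw [e2]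
        _ ≤ p + 2 ^ (s1 - 1) + 2 ^ 55 := by omega
    omega

-- left margin fits inside the row: round(width*0.08) ≤ width on the domain
theorem left_le_width (w : Int) (h1 : 1 ≤ w) (h2 : w ≤ 2147483648) :
    pyRoundMul w 5764607523034235 56 ≤ w := by
  simp only [pyRoundMul, if_neg (by omega : ¬ w < 0)]
  have hn1 : 1 ≤ w.natAbs := by omega
  have hn2 : w.natAbs ≤ 2147483648 := by omega
  have := pvRoundPos_le w.natAbs 5764607523034235 (by norm_num) (by norm_num) hn1 hn2
  omega

-- the interior-row strip characterisation
theorem strip_filter (w l r : Int) (hl0 : 0 ≤ l) (hlw : l ≤ w) (hr0 : 0 ≤ r) :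
    (PySem.List.pyRange 0 w 1).filter (fun x => decide (x < l ∨ w - r ≤ x))
      = PySem.List.pyRange 0 l 1 ++ PySem.List.pyRange (max (w - r) l) w 1 := by
  set m := max (w - r) l with hm
  have hlm : l ≤ m := le_max_right _ _
  have hmw : m ≤ w := max_le (by omega) hlw
  rw [PySem.List.pyRange_one_append 0 l w hl0 hlw,
      PySem.List.pyRange_one_append l m w hlm hmw, List.filter_append, List.filter_append]
  congr 1
  · apply List.filter_eq_self.mpr
    intro x hx
    rw [PySem.List.mem_pyRange_one] at hx
    simp only [decide_eq_true_eq]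
    left; omega
  have h2 : (PySem.List.pyRange l m 1).filter (fun x => decide (x < l ∨ w - r ≤ x)) = [] := by
    apply List.filter_eq_nil_iff.mpr
    intro x hx
    rw [PySem.List.mem_pyRange_one] at hx
    simp only [decide_eq_true_eq, not_or]
    rcases le_total (w - r) l with hc | hc
    · rw [max_eq_right hc] at hm
      constructor <;> omega
    · rw [max_eq_left hc] at hm
      constructor <;> omega
  rw [h2, List.nil_append]
  apply List.filter_eq_self.mpr
  intro x hx
  rw [PySem.List.mem_pyRange_one] at hx
  simp only [decide_eq_true_eq]
  right
  have : w - r ≤ m := le_max_left _ _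
  omega

-- ===== VERDICT (by name: the statement is the Claim_ definition above) =====
theorem obtenerBordes_spec : Claim_equal_obtenerBordes := by
  intro w h hdom
  have hw2 : w ≤ 2147483648 := by
    simp only [Dom_obtenerBordes, pvDomInt, Bool.and_eq_true, decide_eq_true_eq] at hdom
    exact hdom.1.2
  unfold Spec_obtenerBordes obtenerBordes obtenerBordes_alt
  set t := pyRoundMul h 6485183463413514 56
  set b := pyRoundMul h 7205759403792794 57
  set l := pyRoundMul w 5764607523034235 56
  set r := pyRoundMul w 5764607523034235 57
  apply PySem.List.foldl_congr_mem
  intro acc y _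
  rw [pv_foldl_append_ite_map (fun x => y < t ∨ h - b ≤ y ∨ x < l ∨ w - r ≤ x)
        (fun x => ((y : Int), x)) _ acc]
  by_cases hy : y < t ∨ h - b ≤ y
  · rw [if_pos hy]
    congr 1
    rw [List.filter_eq_self.mpr]
    intro x _
    simp only [decide_eq_true_eq]
    tauto
  · rw [if_neg hy, List.append_assoc]
    congr 1
    rw [List.filter_congr (q := fun x => decide (x < l ∨ w - r ≤ x))
        (by intro x _; rw [decide_eq_decide]; tauto)]
    by_cases hw : w ≤ 0
    · -- empty rows: all three ranges are empty
      have hl0 : l ≤ 0 := pyRoundMul_nonpos w _ _ hw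
      have hr0 : r ≤ 0 := pyRoundMul_nonpos w _ _ hw
      rw [PySem.List.pyRange_one_eq_nil hw, PySem.List.pyRange_one_eq_nil hl0,
          PySem.List.pyRange_one_eq_nil (by rcases max_choice (w - r) l with hc | hc <;> omega)]
      simp
    · have hl0 : 0 ≤ l := pyRoundMul_nonneg w _ _ (by omega)
      have hr0 : 0 ≤ r := pyRoundMul_nonneg w _ _ (by omega)
      have hlw : l ≤ w := left_le_width w (by omega) hw2
      rw [strip_filter w l r hl0 hlw hr0, List.map_append]
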